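-- pv_equiv track=rewrite | github.com/Mozz3d/CyberpunkGhidraUtils | CyberpunkHashReverser.py | adler32
-- ===== SOURCE A (Python) =====
-- def adler32(data):
--     MOD_ADLER = 65521
--     a = 1
--     b = 0
--
--     for byte in data:
--         a = (a + ord(byte)) % MOD_ADLER
--         b = (b + a) % MOD_ADLER
--
--     return (b << 16) | a
-- ===== SOURCE B (Python) =====
-- def adler32(data):
--     MOD_ADLER = 65521
--     NMAX = 5552
--     a = 1
--     b = 0
--     rest = data
--     while rest:
--         chunk = rest[:NMAX]
--         rest = rest[NMAX:]
--         for byte in chunk: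
--             a += ord(byte)
--             b += a
--         a %= MOD_ADLER
--         b %= MOD_ADLER
--     return (b << 16) | a
-- ===== Notes on version B (the rewrite author's own statement) =====
-- stated objective: alternative
-- what changed: Replaces the per-byte double modulo with the canonical zlib NMAX block scheme: an outer loop over 5552-byte chunks keeps unreduced running sums a,b in the inner loop and reduces mod 65521 only once per chunk.
import Mathlib
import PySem

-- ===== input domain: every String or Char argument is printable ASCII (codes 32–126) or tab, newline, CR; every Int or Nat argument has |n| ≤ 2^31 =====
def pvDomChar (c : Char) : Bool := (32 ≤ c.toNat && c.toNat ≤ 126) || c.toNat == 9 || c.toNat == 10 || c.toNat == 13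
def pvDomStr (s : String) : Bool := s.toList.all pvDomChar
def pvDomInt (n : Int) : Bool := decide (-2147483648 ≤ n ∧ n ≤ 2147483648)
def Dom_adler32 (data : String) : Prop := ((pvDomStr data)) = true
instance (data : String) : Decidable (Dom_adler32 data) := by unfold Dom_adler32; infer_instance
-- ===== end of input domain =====

-- B computes the same Adler-32 value via the canonical zlib NMAX block scheme (unreduced
-- sums inside 5552-byte chunks, one modulo per chunk) instead of A's two modulos per byte.

-- ===== PORT A =====
-- Python '(b << 16) | a' on the nonnegative ints b, a (both are results of % 65521, hence ≥ 0):
-- exact via Nat shift/or.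
def pvCombine (b a : Int) : Int := Int.ofNat ((b.toNat <<< 16) ||| a.toNat)

-- one iteration of A's loop body: a = (a + ord(byte)) % 65521; b = (b + a) % 65521
def pvStepMod (st : Int × Int) (c : Char) : Int × Int :=
  let a := (st.1 + (c.toNat : Int)) % 65521
  (a, (st.2 + a) % 65521)

def adler32 (data : String) : Int :=
  let p := data.toList.foldl pvStepMod (1, 0)
  pvCombine p.2 p.1

-- ===== PORT B =====
-- one iteration of B's inner loop body: a += ord(byte); b += a  (no modulo)
def pvStepRaw (st : Int × Int) (c : Char) : Int × Int :=
  let a := st.1 + (c.toNat : Int)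
  (a, st.2 + a)

-- B's 'while rest:' loop; rest[:5552] / rest[5552:] on nonnegative bounds are take/drop
-- (PySem.List.slice_to_natCast / slice_from_natCast).
def pvChunkLoop (a b : Int) (rest : List Char) : Int × Int :=
  if rest.isEmpty then (a, b)
  else
    let p := (rest.take 5552).foldl pvStepRaw (a, b)
    pvChunkLoop (p.1 % 65521) (p.2 % 65521) (rest.drop 5552)
termination_by rest.length
decreasing_by
  rename_i h
  simp only [List.isEmpty_iff] at h
  have := List.length_pos_iff.mpr h
  simp [List.length_drop]
  omega

def adler32_alt (data : String) : Int :=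
  let p := pvChunkLoop 1 0 data.toList
  pvCombine p.2 p.1

-- ===== PRECONDITION & SPEC =====
def Spec_adler32 (data : String) (out : Int) : Prop := out = adler32_alt data
instance (data : String) (out : Int) : Decidable (Spec_adler32 data out) := by unfold Spec_adler32; infer_instance

-- ===== CLAIM (what is proved, stated in full; the proofs are below) =====
def Claim_equal_adler32 : Prop := ∀ (data : String), Dom_adler32 data → Spec_adler32 data (adler32 data)

-- ===== LEMMAS AND PROOFS =====

-- folding the per-byte-reduced step from a reduced state = reducing the raw fold once at the end
theorem pv_mod_fold (l : List Char) : ∀ a b : Int,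
    l.foldl pvStepMod (a % 65521, b % 65521) =
      ((l.foldl pvStepRaw (a, b)).1 % 65521, (l.foldl pvStepRaw (a, b)).2 % 65521) := by
  induction l with
  | nil => intro a b; rfl
  | cons c l ih =>
    intro a b
    have h1 : (a % 65521 + (c.toNat : Int)) % 65521 = (a + (c.toNat : Int)) % 65521 :=
      Int.emod_add_emod a 65521 (c.toNat : Int)
    simp only [List.foldl, pvStepMod, pvStepRaw, h1, Int.add_emod_emod]
    rw [Int.emod_add_emod]
    exact ih (a + (c.toNat : Int)) (b + (a + (c.toNat : Int)))

-- B's chunk loop, started from a reduced state, computes A's fold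
theorem pv_loop_eq (n : Nat) : ∀ (l : List Char), l.length ≤ n → ∀ a b : Int,
    pvChunkLoop (a % 65521) (b % 65521) l = l.foldl pvStepMod (a % 65521, b % 65521) := by
  induction n with
  | zero =>
    intro l hl a b
    have : l = [] := List.eq_nil_of_length_eq_zero (Nat.le_zero.mp hl)
    subst this
    rw [pvChunkLoop]; rfl
  | succ n ih =>
    intro l hl a b
    rw [pvChunkLoop]
    by_cases h : l.isEmpty
    · simp only [h, if_true]
      rw [List.isEmpty_iff.mp h]
      rfl
    · simp only [h, Bool.false_eq_true, if_false]
      have hmm : (a % 65521) % 65521 = a % 65521 := Int.emod_emod_of_dvd a dvd_rfl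
      have hmm' : (b % 65521) % 65521 = b % 65521 := Int.emod_emod_of_dvd b dvd_rfl
      have hraw := pv_mod_fold (l.take 5552) (a % 65521) (b % 65521)
      rw [hmm, hmm'] at hraw
      have hlen : (l.drop 5552).length ≤ n := by
        have : l ≠ [] := fun he => h (by simp [he])
        have : 0 < l.length := List.length_pos_iff.mpr this
        simp [List.length_drop]; omega
      have hstep := ih (l.drop 5552) hlen
        ((l.take 5552).foldl pvStepRaw (a % 65521, b % 65521)).1
        ((l.take 5552).foldl pvStepRaw (a % 65521, b % 65521)).2
      rw [hstep, ← hraw]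
      conv_rhs => rw [← List.take_append_drop 5552 l, List.foldl_append]

theorem adler32_spec : Claim_equal_adler32 := by
  intro data _
  unfold Spec_adler32 adler32 adler32_alt
  have h1 : (1 : Int) = 1 % 65521 := by norm_num
  have h0 : (0 : Int) = 0 % 65521 := by norm_num
  rw [show pvChunkLoop 1 0 data.toList = pvChunkLoop (1 % 65521) (0 % 65521) data.toList by
        rw [← h1, ← h0],
      pv_loop_eq data.toList.length data.toList le_rfl 1 0, ← h1, ← h0]
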